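-- pv_equiv track=rewrite | github.com/vampirvampi/FP | main.py | mul_list
-- ===== SOURCE A (Python) =====
-- def mul_list(list, num, list2=None, prev=None):
--     if list2 is None:
--         list2 = []
--     if (len(list) <= 1):
--         return list2
--     else:
--         if (list[1] > num):
--             if (prev == None):
--                 prev = list[1]
--                 return mul_list(list[2:], num, list2, prev)
--             else:
--                 list2.append(prev * list[1])
--                 prev = list[1]
--                 return mul_list(list[2:], num, list2, prev)
-- ===== SOURCE B (Python) =====
-- def mul_list(list, num, list2=None, prev=None):
--     if list2 is None:
--         list2 = []
--     for o in list[1::2]: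
--         if o <= num:
--             return None
--         if prev is not None:
--             list2.append(prev * o)
--         prev = o
--     return list2
-- ===== Notes on version B (the rewrite author's own statement) =====
-- stated objective: faster
-- what changed: Replaces A's recursion with list slicing at every step by a single iterative pass over list[1::2], accumulating products directly.
import Mathlib
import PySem

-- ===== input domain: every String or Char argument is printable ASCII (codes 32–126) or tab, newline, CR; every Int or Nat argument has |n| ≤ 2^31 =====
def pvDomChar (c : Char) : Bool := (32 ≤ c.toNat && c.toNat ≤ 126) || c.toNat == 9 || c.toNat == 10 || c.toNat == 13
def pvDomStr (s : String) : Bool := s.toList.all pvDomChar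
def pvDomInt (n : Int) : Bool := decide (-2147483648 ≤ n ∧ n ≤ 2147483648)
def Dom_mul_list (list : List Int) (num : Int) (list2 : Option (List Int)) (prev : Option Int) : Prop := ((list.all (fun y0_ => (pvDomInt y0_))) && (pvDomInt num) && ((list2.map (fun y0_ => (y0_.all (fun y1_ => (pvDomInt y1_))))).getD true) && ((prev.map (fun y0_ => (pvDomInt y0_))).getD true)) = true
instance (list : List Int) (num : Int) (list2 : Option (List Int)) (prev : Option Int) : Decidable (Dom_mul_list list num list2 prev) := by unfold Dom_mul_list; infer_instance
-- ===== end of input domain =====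

-- B replaces A's recursion-with-slicing by one iterative pass over the odd-index elements (objective: faster).
-- Note: both A and B append to the caller's list2 in place; the equivalence proved here is about the return value.


-- ===== PORT A =====
-- list[2:] = drop 2 (used by the port's termination proof)
theorem pvSlice2 (l : List Int) : PySem.List.slice l (some 2) none = l.drop 2 := by
  simpa using PySem.List.slice_from_natCast l 2

def mul_list (list : List Int) (num : Int) (list2 : Option (List Int)) (prev : Option Int) : Option (List Int) :=
  let l2 := list2.getD []                       -- if list2 is None: list2 = []
  if list.length ≤ 1 then some l2
  else
    let x := PySem.List.pyGetD list 1 0         -- list[1], in range since len(list) ≥ 2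
    if x > num then
      match prev with
      | none => mul_list (PySem.List.slice list (some 2) none) num (some l2) (some x)
      | some p => mul_list (PySem.List.slice list (some 2) none) num (some (l2 ++ [p * x])) (some x)
    else none                                   -- falls off the function: returns None
termination_by list.length
decreasing_by
  all_goals rw [pvSlice2]; simp; omega

-- ===== PORT B =====
-- list[1::2]: the elements at indices 1, 3, 5, … (hand port of step-2 slicing; exact)
def pvOdds : List Int → List Int
  | [] => []
  | [_] => []
  | _ :: b :: rest => b :: pvOdds rest

-- the for-loop of Source B over list[1::2], with early return None
def pvMulLoop (num : Int) : List Int → List Int → Option Int → Option (List Int)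
  | [], l2, _ => some l2
  | o :: os, l2, prev =>
    if o ≤ num then none
    else
      match prev with
      | none => pvMulLoop num os l2 (some o)
      | some p => pvMulLoop num os (l2 ++ [p * o]) (some o)

def mul_list_alt (list : List Int) (num : Int) (list2 : Option (List Int)) (prev : Option Int) : Option (List Int) :=
  pvMulLoop num (pvOdds list) (list2.getD []) prev

-- ===== PRECONDITION & SPEC =====
def Spec_mul_list (list : List Int) (num : Int) (list2 : Option (List Int)) (prev : Option Int) (out : Option (List Int)) : Prop := out = mul_list_alt list num list2 prev
instance (list : List Int) (num : Int) (list2 : Option (List Int)) (prev : Option Int) (out : Option (List Int)) : Decidable (Spec_mul_list list num list2 prev out) := by unfold Spec_mul_list; infer_instance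

-- ===== CLAIM (what is proved, stated in full; the proofs are below) =====
def Claim_equal_mul_list : Prop := ∀ (list : List Int) (num : Int) (list2 : Option (List Int)) (prev : Option Int), Dom_mul_list list num list2 prev → Spec_mul_list list num list2 prev (mul_list list num list2 prev)

-- ===== LEMMAS AND PROOFS =====
theorem mul_list_eq_loop (num : Int) :
    ∀ (l : List Int) (list2 : Option (List Int)) (prev : Option Int),
      mul_list l num list2 prev = pvMulLoop num (pvOdds l) (list2.getD []) prev := by
  intro l
  induction l using pvOdds.induct with
  | case1 =>
      intro list2 prev
      simp [mul_list, pvOdds, pvMulLoop]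
  | case2 a =>
      intro list2 prev
      simp [mul_list, pvOdds, pvMulLoop]
  | case3 a b rest ih =>
      intro list2 prev
      rw [mul_list]
      have hx : PySem.List.pyGetD (a :: b :: rest) 1 0 = b := by
        simp [PySem.List.pyGetD]
      have hlen : ¬ (a :: b :: rest).length ≤ 1 := by simp
      rw [if_neg hlen, hx, pvSlice2]
      simp only [List.drop]
      by_cases hb : b > num
      · rw [if_pos hb]
        cases prev with
        | none =>
            dsimp only
            rw [ih (some (list2.getD [])) (some b)]
            simp [pvOdds, pvMulLoop, not_le.mpr hb]
        | some p =>
            dsimp only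
            rw [ih (some (list2.getD [] ++ [p * b])) (some b)]
            simp [pvOdds, pvMulLoop, not_le.mpr hb]
      · rw [if_neg hb]
        simp [pvOdds, pvMulLoop, not_lt.mp hb]

-- ===== VERDICT (by name: the statement is the Claim_ definition above) =====
theorem mul_list_spec : Claim_equal_mul_list := by
  intro list num list2 prev _
  unfold Spec_mul_list mul_list_alt
  exact mul_list_eq_loop num list list2 prev
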